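-- pv_equiv track=rewrite | github.com/mrudu/AALpy | aalpy/learning_algs/register_passive/RA_helper_functions.py | prefixes
-- ===== SOURCE A (Python) =====
-- def prefixes(data):
--     prefixes = []
--     S_plus = []
--     S_minus = []
--     for d, acc in data:
--         if acc:
--             S_plus.append(d)
--         else:
--             S_minus.append(d)
--         for i in range(len(d)):
--             pref = d[:i+1]
--             if pref not in prefixes:
--                 prefixes.append(pref)
--     prefixes.sort(key=lambda x: (len(x), x))
--     return prefixes, S_plus, S_minus
-- ===== SOURCE B (Python) =====
-- def prefixes(data):
--     pref_set = set()
--     S_plus = []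
--     S_minus = []
--     for d, acc in data:
--         (S_plus if acc else S_minus).append(d)
--         p = d
--         while p and p not in pref_set:
--             pref_set.add(p)
--             p = p[:-1]
--     return sorted(pref_set, key=lambda x: (len(x), x)), S_plus, S_minus
-- ===== Notes on version B (the rewrite author's own statement) =====
-- stated objective: faster
-- what changed: B replaces A's forward prefix enumeration with an O(|d|) linear list-membership dedup per prefix by a hash set filled back-to-front (d, d[:-1], ...) with an early stop once a prefix is already known, sorting the set once at the end; S_plus/S_minus are collected in the same single pass.
import Mathlib
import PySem

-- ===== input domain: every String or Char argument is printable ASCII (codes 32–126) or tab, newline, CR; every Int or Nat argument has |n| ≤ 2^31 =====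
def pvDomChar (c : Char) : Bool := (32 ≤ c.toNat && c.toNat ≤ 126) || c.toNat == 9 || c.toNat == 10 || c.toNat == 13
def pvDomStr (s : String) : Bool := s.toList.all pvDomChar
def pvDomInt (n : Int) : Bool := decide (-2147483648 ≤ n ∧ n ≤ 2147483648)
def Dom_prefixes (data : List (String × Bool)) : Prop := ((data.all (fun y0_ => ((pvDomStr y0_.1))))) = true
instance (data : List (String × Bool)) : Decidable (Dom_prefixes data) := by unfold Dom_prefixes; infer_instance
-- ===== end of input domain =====

-- B builds the set of prefixes back-to-front with an early stop instead of A's linear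
-- list-membership dedup per prefix, and sorts the set once at the end (objective: faster).

-- ===== PORT A =====
-- loop body of A's 'for d, acc in data' (appends to S_plus/S_minus, then dedup-appends each prefix d[:i+1])
def stepA (st : List String × List String × List String) (dp : String × Bool) :
    List String × List String × List String :=
  let sp := if dp.2 then st.2.1 ++ [dp.1] else st.2.1
  let sm := if dp.2 then st.2.2 else st.2.2 ++ [dp.1]
  let prefs := (PySem.List.pyRange 0 (PySem.Str.len dp.1)).foldl
    (fun acc i =>
      let pref := PySem.Str.slice dp.1 none (some (i + 1))
      if pref ∈ acc then acc else acc ++ [pref]) st.1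
  (prefs, sp, sm)

def prefixes (data : List (String × Bool)) : List String × List String × List String :=
  let st := data.foldl stepA ([], [], [])
  (PySem.List.sorted2 st.1 PySem.Str.len (fun x => x), st.2.1, st.2.2)

-- ===== PORT B =====
-- B's 'while p and p not in pref_set: pref_set.add(p); p = p[:-1]' (p[:-1] on a string is
-- dropLast of its characters — exact, cf. PySem.Str.slice_to_neg_one)
def addPrefs (s : PySem.Set String) (p : List Char) : PySem.Set String :=
  if p = [] ∨ String.ofList p ∈ s then s
  else addPrefs (PySem.Set.add s (String.ofList p)) p.dropLast
termination_by p.length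
decreasing_by
  rename_i h
  have hp : p ≠ [] := by intro hc; exact h (Or.inl hc)
  have h1 : 0 < p.length := List.length_pos_iff.mpr hp
  have h2 : p.dropLast.length = p.length - 1 := List.length_dropLast
  omega

def stepB (st : PySem.Set String × List String × List String) (dp : String × Bool) :
    PySem.Set String × List String × List String :=
  let sp := if dp.2 then st.2.1 ++ [dp.1] else st.2.1
  let sm := if dp.2 then st.2.2 else st.2.2 ++ [dp.1]
  (addPrefs st.1 dp.1.toList, sp, sm)

def prefixes_alt (data : List (String × Bool)) : List String × List String × List String :=
  let st := data.foldl stepB (PySem.Set.empty, [], [])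
  (PySem.List.sorted2 st.1 PySem.Str.len (fun x => x), st.2.1, st.2.2)

-- ===== PRECONDITION & SPEC =====
def Spec_prefixes (data : List (String × Bool)) (out : List String × List String × List String) : Prop := out = prefixes_alt data
instance (data : List (String × Bool)) (out : List String × List String × List String) : Decidable (Spec_prefixes data out) := by unfold Spec_prefixes; infer_instance

-- ===== CLAIM (what is proved, stated in full; the proofs are below) =====
def Claim_equal_prefixes : Prop := ∀ (data : List (String × Bool)), Dom_prefixes data → Spec_prefixes data (prefixes data)

-- ===== LEMMAS AND PROOFS =====

-- ---- canonicity of the (len, lex) insertion sort under permutation of a duplicate-free list ----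

-- strict shortlex relation for key (k1 x, x)
def Rk (k1 : String → Int) (a b : String) : Prop :=
  k1 a < k1 b ∨ (k1 a = k1 b ∧ a < b)

theorem sorted2_eq_foldl (xs : List String) (k1 : String → Int) :
    PySem.List.sorted2 xs k1 (fun x => x) false =
      xs.foldl (fun acc x => PySem.List.insertBy
        (fun a b => decide (k1 a < k1 b) || (!decide (k1 b < k1 a) && decide (a < b))) x acc) [] := rfl

theorem before_iff (k1 : String → Int) (a b : String) :
    (decide (k1 a < k1 b) || (!decide (k1 b < k1 a) && decide (a < b))) = true ↔ Rk k1 a b := by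
  simp [Rk]
  constructor
  · rintro (h | ⟨h1, h2⟩)
    · exact Or.inl h
    · rcases lt_or_ge (k1 a) (k1 b) with h3 | h3
      · exact Or.inl h3
      · exact Or.inr ⟨by omega, h2⟩
  · rintro (h | ⟨h1, h2⟩)
    · exact Or.inl h
    · exact Or.inr ⟨by omega, h2⟩

theorem Rk_trans (k1 : String → Int) {a b c : String} (h1 : Rk k1 a b) (h2 : Rk k1 b c) : Rk k1 a c := by
  rcases h1 with h1 | ⟨e1, l1⟩ <;> rcases h2 with h2 | ⟨e2, l2⟩
  · exact Or.inl (lt_trans h1 h2)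
  · exact Or.inl (by omega)
  · exact Or.inl (by omega)
  · exact Or.inr ⟨by omega, lt_trans l1 l2⟩

theorem Rk_asymm (k1 : String → Int) {a b : String} (h1 : Rk k1 a b) (h2 : Rk k1 b a) : False := by
  rcases h1 with h1 | ⟨e1, l1⟩ <;> rcases h2 with h2 | ⟨e2, l2⟩
  · omega
  · omega
  · omega
  · exact lt_asymm l1 l2

theorem Rk_total (k1 : String → Int) {a b : String} (h : a ≠ b) : Rk k1 a b ∨ Rk k1 b a := by
  rcases lt_trichotomy (k1 a) (k1 b) with h1 | h1 | h1
  · exact Or.inl (Or.inl h1)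
  · rcases lt_or_gt_of_ne h with h2 | h2
    · exact Or.inl (Or.inr ⟨h1, h2⟩)
    · exact Or.inr (Or.inr ⟨h1.symm, h2⟩)
  · exact Or.inr (Or.inl h1)

theorem insertBy_cons (b4 : String → String → Bool) (x y : String) (ys : List String) :
    PySem.List.insertBy b4 x (y :: ys) =
      if b4 x y then x :: y :: ys else y :: PySem.List.insertBy b4 x ys := rfl

theorem insertBy_perm (b4 : String → String → Bool) (x : String) (l : List String) :
    (PySem.List.insertBy b4 x l).Perm (x :: l) := by
  induction l with
  | nil => exact List.Perm.refl _
  | cons y ys ih =>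
    rw [insertBy_cons]
    split
    · exact List.Perm.refl _
    · exact ((ih.cons y).trans (List.Perm.swap x y ys))

theorem insertBy_pairwise (k1 : String → Int) (x : String) (l : List String)
    (hl : l.Pairwise (Rk k1)) (hx : ∀ y ∈ l, x ≠ y) :
    (PySem.List.insertBy
      (fun a b => decide (k1 a < k1 b) || (!decide (k1 b < k1 a) && decide (a < b))) x l).Pairwise (Rk k1) := by
  induction l with
  | nil => simp [PySem.List.insertBy]
  | cons y ys ih =>
    rw [insertBy_cons]
    rcases List.pairwise_cons.mp hl with ⟨hy, hys⟩
    split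
    · rename_i hb
      have hxy : Rk k1 x y := (before_iff k1 x y).mp hb
      exact List.pairwise_cons.mpr ⟨by
        intro z hz
        rcases List.mem_cons.mp hz with rfl | hz
        · exact hxy
        · exact Rk_trans k1 hxy (hy z hz), hl⟩
    · rename_i hb
      have hyx : Rk k1 y x := by
        rcases Rk_total k1 (hx y (List.mem_cons_self)) with h | h
        · exact absurd ((before_iff k1 x y).mpr h) hb
        · exact h
      refine List.pairwise_cons.mpr ⟨?_, ih hys (fun z hz => hx z (List.mem_cons_of_mem _ hz))⟩
      intro z hz
      rcases (PySem.List.mem_insertBy _ _ _ _).mp hz with rfl | hz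
      · exact hyx
      · exact hy z hz

theorem foldl_insert_sorted (k1 : String → Int) :
    ∀ (l acc : List String), l.Nodup → acc.Pairwise (Rk k1) → acc.Nodup →
      (∀ x ∈ l, x ∉ acc) →
      (l.foldl (fun acc x => PySem.List.insertBy
        (fun a b => decide (k1 a < k1 b) || (!decide (k1 b < k1 a) && decide (a < b))) x acc) acc).Pairwise (Rk k1) := by
  intro l
  induction l with
  | nil => intro acc _ h2 _ _; exact h2
  | cons x xs ih =>
    intro acc h1 h2 h3 h4
    rcases List.nodup_cons.mp h1 with ⟨hx, hxs⟩
    simp only [List.foldl_cons]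
    apply ih _ hxs
    · exact insertBy_pairwise k1 x acc h2 (fun y hy => fun he => h4 x List.mem_cons_self (he ▸ hy))
    · exact ((insertBy_perm _ x acc).nodup_iff).mpr (List.nodup_cons.mpr ⟨h4 x List.mem_cons_self, h3⟩)
    · intro z hz hmem
      rcases (PySem.List.mem_insertBy _ _ _ _).mp hmem with rfl | hmem
      · exact hx hz
      · exact h4 z (List.mem_cons_of_mem _ hz) hmem

theorem sorted2_pairwise_of_nodup (k1 : String → Int) (l : List String) (h : l.Nodup) :
    (PySem.List.sorted2 l k1 (fun x => x) false).Pairwise (Rk k1) := by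
  rw [sorted2_eq_foldl]
  exact foldl_insert_sorted k1 l [] h (List.Pairwise.nil) (List.nodup_nil) (by simp)

theorem sorted2_congr_perm (k1 : String → Int) (l₁ l₂ : List String)
    (h1 : l₁.Nodup) (hp : l₁.Perm l₂) :
    PySem.List.sorted2 l₁ k1 (fun x => x) = PySem.List.sorted2 l₂ k1 (fun x => x) := by
  have h2 : l₂.Nodup := hp.nodup_iff.mp h1
  have p1 := PySem.List.sorted2_perm l₁ k1 (fun x => x) false
  have p2 := PySem.List.sorted2_perm l₂ k1 (fun x => x) false
  exact (p1.trans (hp.trans p2.symm)).eq_of_pairwise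
    (fun a b _ _ hab hba => (Rk_asymm k1 hab hba).elim)
    (sorted2_pairwise_of_nodup k1 l₁ h1) (sorted2_pairwise_of_nodup k1 l₂ h2)

-- ---- what A's inner loop computes: membership and duplicate-freeness ----

-- x is a nonempty prefix of d
def NP (d x : String) : Prop := ∃ q, q ≠ [] ∧ q <+: d.toList ∧ x = String.ofList q

theorem foldA_mem (g : Int → String) (idx : List Int) :
    ∀ (acc : List String) (x : String),
      (x ∈ idx.foldl (fun acc i => if g i ∈ acc then acc else acc ++ [g i]) acc ↔
        x ∈ acc ∨ ∃ i ∈ idx, x = g i) := by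
  induction idx with
  | nil => simp
  | cons i is ih =>
    intro acc x
    simp only [List.foldl_cons]
    rw [ih]
    by_cases h : g i ∈ acc
    · simp only [if_pos h]
      constructor
      · rintro (hx | hx)
        · exact Or.inl hx
        · exact Or.inr (by simpa using Or.inr hx)
      · rintro (hx | hx)
        · exact Or.inl hx
        · rcases by simpa using hx with rfl | hx
          · exact Or.inl h
          · exact Or.inr hx
    · simp only [if_neg h, List.mem_append, List.mem_singleton]
      constructor
      · rintro ((hx | rfl) | hx)
        · exact Or.inl hx
        · exact Or.inr ⟨i, by simp⟩
        · exact Or.inr (by simpa using Or.inr hx)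
      · rintro (hx | hx)
        · exact Or.inl (Or.inl hx)
        · rcases by simpa using hx with rfl | hx
          · exact Or.inl (Or.inr rfl)
          · exact Or.inr hx

theorem foldA_nodup (g : Int → String) (idx : List Int) :
    ∀ (acc : List String), acc.Nodup →
      (idx.foldl (fun acc i => if g i ∈ acc then acc else acc ++ [g i]) acc).Nodup := by
  induction idx with
  | nil => intro acc h; exact h
  | cons i is ih =>
    intro acc h
    simp only [List.foldl_cons]
    by_cases hm : g i ∈ acc
    · rw [if_pos hm]; exact ih acc h
    · rw [if_neg hm]
      refine ih _ ?_
      rw [List.nodup_append]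
      refine ⟨h, List.nodup_singleton _, ?_⟩
      intro a ha b hb
      rw [List.mem_singleton] at hb
      subst hb
      intro he
      subst he
      exact hm ha

theorem slice_prefix (d : String) (i : Int) (hi : 0 ≤ i) :
    PySem.Str.slice d none (some (i + 1)) = String.ofList (d.toList.take (i.toNat + 1)) := by
  have h1 : (0:Int) ≤ i + 1 := by omega
  have h2 : (i + 1).toNat = i.toNat + 1 := by omega
  simp [PySem.Str.slice, PySem.Chars.slice, PySem.List.slice_to _ h1, h2]

theorem exists_idx_iff_NP (d x : String) :
    (∃ i ∈ PySem.List.pyRange 0 (PySem.Str.len d),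
        x = PySem.Str.slice d none (some (i + 1))) ↔ NP d x := by
  constructor
  · rintro ⟨i, hi, rfl⟩
    rw [PySem.List.mem_pyRange_one] at hi
    rw [PySem.Str.len_eq] at hi
    obtain ⟨hi0, hi1⟩ := hi
    have hn : 0 < d.toList.length := by omega
    refine ⟨d.toList.take (i.toNat + 1), ?_, List.take_prefix _ _, (slice_prefix d i hi0).symm ▸ rfl⟩
    apply List.length_pos_iff.mp
    rw [List.length_take]
    omega
  · rintro ⟨q, hq, hpre, rfl⟩
    have hlen : q.length ≤ d.toList.length := hpre.length_le
    have hpos : 0 < q.length := List.length_pos_iff.mpr hq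
    refine ⟨(q.length : Int) - 1, ?_, ?_⟩
    · rw [PySem.List.mem_pyRange_one, PySem.Str.len_eq]; omega
    · have h0 : (0:Int) ≤ (q.length : Int) - 1 := by omega
      rw [slice_prefix d _ h0]
      have : ((q.length : Int) - 1).toNat + 1 = q.length := by omega
      rw [this]
      exact congrArg String.ofList (List.prefix_iff_eq_take.mp hpre)

theorem stepA_mem (st : List String × List String × List String) (dp : String × Bool) (x : String) :
    x ∈ (stepA st dp).1 ↔ x ∈ st.1 ∨ NP dp.1 x := by
  simp only [stepA]
  rw [foldA_mem (fun i => PySem.Str.slice dp.1 none (some (i + 1)))]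
  rw [exists_idx_iff_NP]

theorem stepA_nodup (st : List String × List String × List String) (dp : String × Bool)
    (h : st.1.Nodup) : (stepA st dp).1.Nodup := by
  simp only [stepA]
  exact foldA_nodup (fun i => PySem.Str.slice dp.1 none (some (i + 1))) _ _ h

-- ---- what B's early-stopping while loop computes ----

-- closedness up to length m: every short-enough member has all its nonempty prefixes present
def HcB (s : List String) (m : Nat) : Prop :=
  ∀ x ∈ s, x.toList.length ≤ m → ∀ q, q ≠ [] → q <+: x.toList → String.ofList q ∈ s

theorem prefix_dropLast_iff (p q : List Char) (hp : p ≠ []) :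
    (q ≠ [] ∧ q <+: p) ↔ q = p ∨ (q ≠ [] ∧ q <+: p.dropLast) := by
  constructor
  · rintro ⟨hq, hpre⟩
    by_cases he : q = p
    · exact Or.inl he
    · refine Or.inr ⟨hq, ?_⟩
      have hlt : q.length < p.length := by
        rcases lt_or_eq_of_le hpre.length_le with h | h
        · exact h
        · exact absurd (List.prefix_iff_eq_take.mp hpre ▸ (h ▸ List.take_length (l := p)) : q = p) he
      rw [List.dropLast_eq_take]
      rw [List.prefix_iff_eq_take.mp hpre]
      have : q.length ≤ p.length - 1 := by omega
      rw [List.prefix_iff_eq_take]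
      rw [List.length_take]
      rw [List.take_take]
      congr 1
      omega
  · rintro (rfl | ⟨hq, hpre⟩)
    · exact ⟨hp, List.prefix_refl _⟩
    · exact ⟨hq, hpre.trans (List.dropLast_prefix _)⟩

theorem addPrefs_mem : ∀ (s : PySem.Set String) (p : List Char), HcB s p.length →
    ∀ x, (x ∈ addPrefs s p ↔ x ∈ s ∨ ∃ q, q ≠ [] ∧ q <+: p ∧ x = String.ofList q) := by
  intro s p
  induction s, p using addPrefs.induct with
  | case1 s p h =>
    intro hc x
    rw [addPrefs, if_pos h]
    rcases h with rfl | h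
    · simp
    · constructor
      · exact Or.inl
      · rintro (hx | ⟨q, hq, hpre, rfl⟩)
        · exact hx
        · exact hc _ h (by simp) q hq (by simpa using hpre)
  | case2 s p h ih =>
    intro hc x
    have hp : p ≠ [] := fun hcon => h (Or.inl hcon)
    rw [addPrefs, if_neg h]
    have hc' : HcB (PySem.Set.add s (String.ofList p)) p.dropLast.length := by
      intro y hy hlen q hq hpre
      rcases (PySem.Set.mem_add s (String.ofList p) y).mp hy with hy | rfl
      · have : y.toList.length ≤ p.length := by
          have := List.length_dropLast (xs := p); omega
        exact (PySem.Set.mem_add s (String.ofList p) _).mpr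
          (Or.inl (hc y hy this q hq hpre))
      · exfalso
        have h1 : 0 < p.length := List.length_pos_iff.mpr hp
        have h2 : p.dropLast.length = p.length - 1 := List.length_dropLast
        simp at hlen
        omega
    rw [ih hc' x]
    rw [PySem.Set.mem_add]
    constructor
    · rintro ((hx | rfl) | ⟨q, hq, hpre, rfl⟩)
      · exact Or.inl hx
      · exact Or.inr ⟨p, hp, List.prefix_refl _, rfl⟩
      · exact Or.inr ⟨q, hq, hpre.trans (List.dropLast_prefix _), rfl⟩
    · rintro (hx | ⟨q, hq, hpre, rfl⟩)
      · exact Or.inl (Or.inl hx)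
      · rcases (prefix_dropLast_iff p q hp).mp ⟨hq, hpre⟩ with rfl | ⟨hq', hpre'⟩
        · exact Or.inl (Or.inr rfl)
        · exact Or.inr ⟨q, hq', hpre', rfl⟩

theorem addPrefs_nodup : ∀ (s : PySem.Set String) (p : List Char), s.Nodup → (addPrefs s p).Nodup := by
  intro s p
  induction s, p using addPrefs.induct with
  | case1 s p h => intro hs; rw [addPrefs, if_pos h]; exact hs
  | case2 s p h ih =>
    intro hs
    rw [addPrefs, if_neg h]
    exact ih (PySem.Set.nodup_add s (String.ofList p) hs)

-- ---- the parallel fold invariant ----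

-- full prefix-closedness of the prefix set
def ClosedB (s : List String) : Prop :=
  ∀ x ∈ s, ∀ q, q ≠ [] → q <+: x.toList → String.ofList q ∈ s

theorem ClosedB.toHcB {s : List String} (h : ClosedB s) (m : Nat) : HcB s m :=
  fun x hx _ q hq hpre => h x hx q hq hpre

theorem addPrefs_mem_NP (S : PySem.Set String) (d : String) (hS : ClosedB S) (x : String) :
    x ∈ addPrefs S d.toList ↔ x ∈ S ∨ NP d x :=
  addPrefs_mem S d.toList (hS.toHcB _) x

theorem closed_addPrefs (S : PySem.Set String) (d : String) (hS : ClosedB S) :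
    ClosedB (addPrefs S d.toList) := by
  intro x hx q hq hpre
  rcases (addPrefs_mem_NP S d hS x).mp hx with hx | ⟨q0, hq0, hpre0, rfl⟩
  · exact (addPrefs_mem_NP S d hS _).mpr (Or.inl (hS x hx q hq hpre))
  · refine (addPrefs_mem_NP S d hS _).mpr (Or.inr ⟨q, hq, ?_, rfl⟩)
    exact (by simpa using hpre : q <+: q0).trans hpre0

theorem main_fold :
    ∀ (data : List (String × Bool)) (stA : List String × List String × List String)
      (stB : PySem.Set String × List String × List String),
      stA.2 = stB.2 → stA.1.Nodup → stB.1.Nodup → ClosedB stB.1 →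
      (∀ x, x ∈ stA.1 ↔ x ∈ stB.1) →
      (data.foldl stepA stA).2 = (data.foldl stepB stB).2 ∧
      (data.foldl stepA stA).1.Nodup ∧
      (data.foldl stepB stB).1.Nodup ∧
      (∀ x, x ∈ (data.foldl stepA stA).1 ↔ x ∈ (data.foldl stepB stB).1) := by
  intro data
  induction data with
  | nil => intro stA stB h1 h2 h3 _ h5; exact ⟨h1, h2, h3, h5⟩
  | cons dp rest ih =>
    intro stA stB h1 h2 h3 h4 h5
    simp only [List.foldl_cons]
    apply ih
    · show (stepA stA dp).2 = (stepB stB dp).2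
      simp only [stepA, stepB, h1]
    · exact stepA_nodup stA dp h2
    · exact addPrefs_nodup stB.1 dp.1.toList h3
    · exact closed_addPrefs stB.1 dp.1 h4
    · intro x
      rw [stepA_mem]
      show _ ↔ x ∈ addPrefs stB.1 dp.1.toList
      rw [addPrefs_mem_NP stB.1 dp.1 h4 x]
      rw [h5 x]

theorem prefixes_eq (data : List (String × Bool)) : prefixes data = prefixes_alt data := by
  obtain ⟨h1, h2, h3, h4⟩ :=
    main_fold data ([], [], []) (PySem.Set.empty, [], []) rfl List.nodup_nil List.nodup_nil
      (fun x hx => absurd hx (List.not_mem_nil)) (fun x => Iff.rfl)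
  have hperm : (data.foldl stepA ([], [], [])).1.Perm (data.foldl stepB (PySem.Set.empty, [], [])).1 :=
    (List.perm_ext_iff_of_nodup h2 h3).mpr h4
  simp only [prefixes, prefixes_alt]
  refine Prod.ext ?_ ?_
  · exact sorted2_congr_perm PySem.Str.len _ _ h2 hperm
  · exact h1

-- ===== VERDICT (by name: the statement is the Claim_ definition above) =====
theorem prefixes_spec : Claim_equal_prefixes := by
  intro data _
  unfold Spec_prefixes
  exact prefixes_eq data
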